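-- pv_equiv track=rewrite | github.com/hamzaqureshi5/pyQT_Application | STCAppScriptV7.py | append_count_to_duplicates
-- ===== SOURCE A (Python) =====
-- def append_count_to_duplicates(input_list):
--     output_list = []
--     element_counts = {}
--
--     for element in input_list:
--         if element in element_counts:
--             element_counts[element] += 1
--             output_list.append(f"{element}{element_counts[element]}")
--         else:
--             element_counts[element] = 0
--             output_list.append(element)
--
--     return output_list
-- ===== SOURCE B (Python) =====
-- def append_count_to_duplicates(input_list):
--     # Pass 1: total occurrence count of each element.
--     remaining = {}
--     for e in input_list:
--         remaining[e] = remaining.get(e, 0) + 1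
--     # Pass 2: walk backwards; after decrementing, remaining[e] is the number of
--     # occurrences of e strictly before this position, i.e. the suffix to append.
--     out = []
--     for e in reversed(input_list):
--         remaining[e] -= 1
--         j = remaining[e]
--         out.append(e if j == 0 else f"{e}{j}")
--     out.reverse()
--     return out
-- ===== Notes on version B (the rewrite author's own statement) =====
-- stated objective: alternative
-- what changed: Instead of A's single forward pass keeping a dict of counts seen so far, B first builds a dict of total counts and then traverses the list in reverse, decrementing the dict so the remaining count is exactly the occurrence index, building the output back-to-front.
import Mathlib
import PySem

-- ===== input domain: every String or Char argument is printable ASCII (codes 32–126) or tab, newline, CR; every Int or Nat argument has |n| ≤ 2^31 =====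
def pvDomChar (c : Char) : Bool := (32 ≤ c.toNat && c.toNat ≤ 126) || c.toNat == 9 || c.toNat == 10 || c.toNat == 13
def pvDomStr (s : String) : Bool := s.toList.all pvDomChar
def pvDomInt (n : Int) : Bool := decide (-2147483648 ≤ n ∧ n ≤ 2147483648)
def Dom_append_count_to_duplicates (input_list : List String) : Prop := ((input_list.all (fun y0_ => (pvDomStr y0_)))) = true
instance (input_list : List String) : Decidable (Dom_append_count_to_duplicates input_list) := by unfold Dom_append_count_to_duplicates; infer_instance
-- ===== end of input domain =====

-- B replaces A's single forward pass with a seen-so-far counts dict by two passes: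
-- a totals dict, then a reverse traversal that decrements it (the remaining count is
-- the occurrence index), building the output back-to-front; objective: alternative.


-- ===== PORT A =====
-- the for-loop of A: state (output_list, element_counts)
def acdA_go : List String → List String → PySem.Dict String Int → List String
  | [], out, _ => out
  | e :: rest, out, cnts =>
    match PySem.Dict.get? cnts e with
    | some c =>      -- element in element_counts: += 1, append f"{element}{count}"
      acdA_go rest (out ++ [e ++ PySem.Int.toStr (c + 1)]) (PySem.Dict.insert cnts e (c + 1))
    | none =>        -- first occurrence: counts[e] = 0, append element itself
      acdA_go rest (out ++ [e]) (PySem.Dict.insert cnts e 0)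

def append_count_to_duplicates (input_list : List String) : List String :=
  acdA_go input_list [] PySem.Dict.empty

-- ===== PORT B =====
-- pass 1 of B: remaining[e] = remaining.get(e, 0) + 1
def acdB_totals (input_list : List String) : PySem.Dict String Int :=
  input_list.foldl (fun d e => d.insert e (d.getD e 0 + 1)) PySem.Dict.empty

-- pass 2 of B: over reversed(input_list); 'remaining[e] -= 1' (the key is always
-- present here, so the getD default is never taken); then j = remaining[e]
def acdB_go : List String → PySem.Dict String Int → List String → List String
  | [], _, out => out
  | e :: rest, rem, out =>
    let rem' := rem.insert e (rem.getD e 0 - 1)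
    let j := rem'.getD e 0
    acdB_go rest rem' (out ++ [if j = 0 then e else e ++ PySem.Int.toStr j])

def append_count_to_duplicates_alt (input_list : List String) : List String :=
  (acdB_go input_list.reverse (acdB_totals input_list) []).reverse

-- ===== PRECONDITION & SPEC =====
def Spec_append_count_to_duplicates (input_list : List String) (out : List String) : Prop := out = append_count_to_duplicates_alt input_list
instance (input_list : List String) (out : List String) : Decidable (Spec_append_count_to_duplicates input_list out) := by unfold Spec_append_count_to_duplicates; infer_instance

-- ===== CLAIM (what is proved, stated in full; the proofs are below) =====
def Claim_equal_append_count_to_duplicates : Prop := ∀ (input_list : List String), Dom_append_count_to_duplicates input_list → Spec_append_count_to_duplicates input_list (append_count_to_duplicates input_list)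

-- ===== LEMMAS AND PROOFS =====

-- common specification: label each element by its count in the prefix before it
def acdBump (m : String → Nat) (e : String) : String → Nat :=
  fun x => if x = e then m x + 1 else m x

def acdSpec : List String → (String → Nat) → List String
  | [], _ => []
  | e :: t, m =>
    (if (m e : Int) = 0 then e else e ++ PySem.Int.toStr (m e)) :: acdSpec t (acdBump m e)

lemma acdA_go_eq (l : List String) : ∀ (out : List String) (d : PySem.Dict String Int)
    (m : String → Nat),
    (∀ e, d.get? e = if m e = 0 then none else some ((m e : Int) - 1)) →
    acdA_go l out d = out ++ acdSpec l m := by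
  induction l with
  | nil => intro out d m _; simp [acdA_go, acdSpec]
  | cons e t ih =>
    intro out d m h
    by_cases hm : m e = 0
    · have hg : d.get? e = none := by rw [h e]; simp [hm]
      rw [acdA_go, hg]
      rw [ih (out ++ [e]) _ (acdBump m e)]
      · simp [acdSpec, hm]
      · intro e'
        rw [PySem.Dict.get?_insert]
        by_cases he : e' = e
        · subst he; simp [acdBump, hm]
        · simp [he, acdBump, h e']
    · have hg : d.get? e = some ((m e : Int) - 1) := by rw [h e]; simp [hm]
      rw [acdA_go]
      simp only [hg]
      have hc : ((m e : Int) - 1) + 1 = (m e : Int) := by ring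
      rw [hc]
      rw [ih (out ++ [e ++ PySem.Int.toStr (m e)]) _ (acdBump m e)]
      · have : ¬ ((m e : Int) = 0) := by exact_mod_cast hm
        simp [acdSpec]
        exact fun hh => absurd hh hm
      · intro e'
        rw [PySem.Dict.get?_insert]
        by_cases he : e' = e
        · subst he; simp [acdBump]
        · simp [he, acdBump, h e']

lemma acdSpec_append (q : List String) (e : String) : ∀ (m : String → Nat),
    acdSpec (q ++ [e]) m = acdSpec q m ++
      [if ((m e + q.count e : Nat) : Int) = 0 then e
       else e ++ PySem.Int.toStr ((m e + q.count e : Nat))] := by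
  induction q with
  | nil => intro m; simp [acdSpec]
  | cons a t ih =>
    intro m
    rw [List.cons_append, acdSpec, ih (acdBump m a), acdSpec]
    have : acdBump m a e + t.count e = m e + (a :: t).count e := by
      rw [List.count_cons]
      by_cases he : e = a
      · subst he; simp [acdBump]; omega
      · have hba : (e == a) = false := by simp [he]
        have hne : ¬ a = e := fun h => he h.symm
        simp [acdBump, hne, he]
    rw [this]
    simp

lemma acdB_go_eq (r : List String) : ∀ (rem : PySem.Dict String Int) (acc : List String),
    (∀ e, rem.getD e 0 = (r.count e : Int)) →
    acdB_go r rem acc = acc ++ (acdSpec r.reverse (fun _ => 0)).reverse := by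
  induction r with
  | nil => intro rem acc _; simp [acdB_go, acdSpec]
  | cons e t ih =>
    intro rem acc h
    rw [acdB_go]
    have hcnt : (e :: t).count e = t.count e + 1 := by simp
    have hj : (rem.insert e (rem.getD e 0 - 1)).getD e 0 = (t.count e : Int) := by
      rw [PySem.Dict.getD_insert_self, h e, hcnt]; push_cast; ring
    rw [hj]
    rw [ih _ _ (fun e' => ?_)]
    · rw [List.reverse_cons, acdSpec_append]
      have hrev : t.reverse.count e = t.count e := List.count_reverse ..
      simp only [hrev, Nat.zero_add, List.reverse_append, List.reverse_cons,
        List.reverse_nil, List.nil_append, List.cons_append]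
      rw [List.append_assoc]
      rfl
    · by_cases he : e' = e
      · subst he; exact hj
      · rw [PySem.Dict.getD_insert]
        have hne : ¬ e = e' := fun hh => he hh.symm
        simp [he, hne, h e']

-- ===== VERDICT (by name: the statement is the Claim_ definition above) =====
theorem append_count_to_duplicates_spec : Claim_equal_append_count_to_duplicates := by
  intro xs _
  show append_count_to_duplicates xs = append_count_to_duplicates_alt xs
  have hA : append_count_to_duplicates xs = acdSpec xs (fun _ => 0) := by
    unfold append_count_to_duplicates
    rw [acdA_go_eq xs [] PySem.Dict.empty (fun _ => 0) (fun e => by simp)]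
    simp
  have hB : append_count_to_duplicates_alt xs = acdSpec xs (fun _ => 0) := by
    unfold append_count_to_duplicates_alt
    rw [acdB_go_eq xs.reverse (acdB_totals xs) [] (fun e => ?_)]
    · simp
    · unfold acdB_totals
      rw [PySem.Dict.getD_foldl_insert_add_one]
      simp [List.count_reverse]
  rw [hA, hB]
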